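-- pv_equiv track=rewrite | github.com/keygle/parseVideo | lib/e/bks1/vv/__init__.py | gen_token_flag_list
-- ===== SOURCE A (Python) =====
-- def gen_token_flag_list(video_info):
--     max_len = 0
--     for v in video_info:
--         l = len(v['file'])
--         if l > max_len:
--             max_len = l
--     # create a long enough flag list and put default flag to False
--     out = []
--     for i in range(max_len):
--         out.append(False)
--     # check file url to set flag to True
--     for v in video_info:
--         for i in range(len(v['file'])):
--             f = v['file'][i]
--             if f['url']:
--                 out[i] = True
--     return out
-- ===== SOURCE B (Python) =====
-- def gen_token_flag_list(video_info):
--     max_len = max((len(v['file']) for v in video_info), default=0)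
--     return [any(v['file'][i]['url'] for v in video_info if i < len(v['file']))
--             for i in range(max_len)]
-- ===== Notes on version B (the rewrite author's own statement) =====
-- stated objective: simpler
-- what changed: Replaces the pre-filled mutable flag array written video-by-video with a column-wise build: max_len via max(..., default=0), then out[i] = any over the videos whose file list reaches index i.
import Mathlib
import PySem

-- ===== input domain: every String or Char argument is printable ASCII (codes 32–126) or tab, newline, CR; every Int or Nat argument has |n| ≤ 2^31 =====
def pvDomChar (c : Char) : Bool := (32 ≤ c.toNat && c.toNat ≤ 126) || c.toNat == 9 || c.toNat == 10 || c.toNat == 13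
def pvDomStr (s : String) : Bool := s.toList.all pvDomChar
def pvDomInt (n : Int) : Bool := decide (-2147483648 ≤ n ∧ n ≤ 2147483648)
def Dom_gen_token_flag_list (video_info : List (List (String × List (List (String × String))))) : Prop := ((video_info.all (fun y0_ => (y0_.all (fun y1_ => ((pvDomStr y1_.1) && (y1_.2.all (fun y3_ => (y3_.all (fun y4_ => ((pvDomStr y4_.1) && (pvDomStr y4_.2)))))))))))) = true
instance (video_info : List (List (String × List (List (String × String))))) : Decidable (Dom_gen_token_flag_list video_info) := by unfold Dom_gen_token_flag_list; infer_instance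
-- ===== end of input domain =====

-- B builds the flag list column-wise (max length, then any() per index) instead of A's
-- pre-filled mutable list written video-by-video; objective: simpler.

-- shared accessors: v['file'] and f['url'] (total via getD; Pre_ guarantees the keys exist)
def pvFiles (v : List (String × List (List (String × String)))) : List (List (String × String)) :=
  PySem.Dict.getD (PySem.Dict.mk v) "file" []

def pvUrl (f : List (String × String)) : String :=
  PySem.Dict.getD (PySem.Dict.mk f) "url" ""

-- ===== PORT A =====
def gen_token_flag_list (video_info : List (List (String × List (List (String × String))))) : List Bool :=
  let max_len : Int := video_info.foldl (fun m v =>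
    let l : Int := ((pvFiles v).length : Int)
    if m < l then l else m) 0
  let out : List Bool := (PySem.List.pyRange 0 max_len 1).foldl (fun out _ => out ++ [false]) []
  video_info.foldl (fun out v =>
    (PySem.List.pyRange 0 (((pvFiles v).length : Int)) 1).foldl (fun out i =>
      let f := PySem.List.pyGetD (pvFiles v) i []
      if pvUrl f ≠ "" then PySem.List.pySetD out i true else out) out) out

-- ===== PORT B =====
def gen_token_flag_list_alt (video_info : List (List (String × List (List (String × String))))) : List Bool :=
  let max_len : Int := PySem.List.maxD (video_info.map (fun v => ((pvFiles v).length : Int))) (fun x => x) 0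
  (PySem.List.pyRange 0 max_len 1).map (fun i =>
    video_info.any (fun v =>
      decide (i < ((pvFiles v).length : Int)) &&
      decide (pvUrl (PySem.List.pyGetD (pvFiles v) i []) ≠ "")))

-- ===== PRECONDITION & SPEC =====
-- Pre_ excludes exactly the inputs on which Python A raises KeyError: a video dict
-- without key 'file', or a file dict without key 'url'.
def Pre_gen_token_flag_list (video_info : List (List (String × List (List (String × String))))) : Prop :=
  ∀ v ∈ video_info, (PySem.Dict.get? (PySem.Dict.mk v) "file").isSome = true ∧
    ∀ f ∈ pvFiles v, (PySem.Dict.get? (PySem.Dict.mk f) "url").isSome = true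

instance (video_info : List (List (String × List (List (String × String))))) : Decidable (Pre_gen_token_flag_list video_info) := by
  unfold Pre_gen_token_flag_list; infer_instance

def pvWitness_gen_token_flag_list : (List (List (String × List (List (String × String))))) :=
  [[("file", [[("url", "http://a")], [("url", "")]])], [("file", [])]]

def Spec_gen_token_flag_list (video_info : List (List (String × List (List (String × String))))) (out : List Bool) : Prop := out = gen_token_flag_list_alt video_info
instance (video_info : List (List (String × List (List (String × String))))) (out : List Bool) : Decidable (Spec_gen_token_flag_list video_info out) := by unfold Spec_gen_token_flag_list; infer_instance

-- ===== CLAIM (what is proved, stated in full; the proofs are below) =====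
def Claim_equal_gen_token_flag_list : Prop := ∀ (video_info : List (List (String × List (List (String × String))))), Dom_gen_token_flag_list video_info → Pre_gen_token_flag_list video_info → Spec_gen_token_flag_list video_info (gen_token_flag_list video_info)

-- ===== LEMMAS AND PROOFS =====

-- the column value at index i: true iff some video's file list reaches i with a nonempty url
def pvCol (video_info : List (List (String × List (List (String × String))))) (i : Nat) : Bool :=
  video_info.any (fun v =>
    decide (i < (pvFiles v).length) && decide (pvUrl ((pvFiles v).getD i []) ≠ ""))

theorem pv_set_map_range {g : Nat → Bool} {L n : Nat} :
    ((List.range L).map g).set n true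
      = (List.range L).map (fun i => if i = n then true else g i) := by
  apply List.ext_getElem
  · simp
  · intro j h1 h2
    simp only [List.getElem_set, List.getElem_map, List.getElem_range]
    by_cases h : n = j <;> simp [h, Ne.symm]

theorem pv_inner_spec (fs : List (List (String × String))) (n L : Nat)
    (g : Nat → Bool) :
    (PySem.List.pyRange 0 (n : Int) 1).foldl (fun out i =>
        let f := PySem.List.pyGetD fs i []
        if pvUrl f ≠ "" then PySem.List.pySetD out i true else out)
      ((List.range L).map g)
      = (List.range L).map (fun i =>
          g i || (decide (i < n) && decide (pvUrl (fs.getD i []) ≠ ""))) := by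
  induction n generalizing g with
  | zero =>
      simp
  | succ m ih =>
      have hsplit : PySem.List.pyRange 0 ((m + 1 : Nat) : Int) 1
          = PySem.List.pyRange 0 (m : Int) 1 ++ [(m : Int)] := by
        have := PySem.List.pyRange_one_succ_right (a := 0) (b := (m : Int)) (by positivity)
        push_cast
        push_cast at this
        exact this
      rw [hsplit, List.foldl_append, ih g]
      simp only [List.foldl_cons, List.foldl_nil, PySem.List.pyGetD_natCast]
      by_cases hu : pvUrl (fs.getD m []) ≠ ""
      · rw [if_pos hu]
        simp only [PySem.List.pySetD_natCast]
        rw [pv_set_map_range]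
        apply List.map_congr_left
        intro i hi
        by_cases h : i = m
        · subst h
          simp only [List.getD_eq_getElem?_getD] at hu
          simp [hu]
        · have : (i < m + 1) ↔ (i < m) := by omega
          simp [h, this]
      · rw [if_neg hu]
        apply List.map_congr_left
        intro i hi
        by_cases h : i = m
        · subst h; simp at hu; simp [hu]
        · have : (i < m + 1) ↔ (i < m) := by omega
          simp [this]

theorem pv_outer_spec (vs : List (List (String × List (List (String × String))))) (L : Nat)
    (g : Nat → Bool) :
    vs.foldl (fun out v =>
        (PySem.List.pyRange 0 (((pvFiles v).length : Int)) 1).foldl (fun out i =>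
          let f := PySem.List.pyGetD (pvFiles v) i []
          if pvUrl f ≠ "" then PySem.List.pySetD out i true else out) out)
      ((List.range L).map g)
      = (List.range L).map (fun i => g i || pvCol vs i) := by
  induction vs generalizing g with
  | nil => simp [pvCol]
  | cons v vs ih =>
      simp only [List.foldl_cons]
      rw [pv_inner_spec (pvFiles v) (pvFiles v).length L,
        ih]
      apply List.map_congr_left
      intro i hi
      simp [pvCol, Bool.or_assoc]

theorem pv_maxfold_eq (l : List Int) (h : ∀ x ∈ l, 0 ≤ x) :
    l.foldl (fun m x => if m < x then x else m) 0
      = PySem.List.maxD l (fun x => x) 0 := by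
  have hmax : ∀ (t : List Int) (a : Int),
      t.foldl (fun m x => if m < x then x else m) a = t.foldl max a := by
    intro t
    induction t with
    | nil => intro a; rfl
    | cons x t ih =>
        intro a
        simp only [List.foldl_cons]
        rw [ih]
        congr 1
        by_cases hx : a < x <;> simp [hx, max_def] <;> omega
  cases l with
  | nil => simp [PySem.List.maxD_nil]
  | cons x t =>
      have h0 : (if (0 : Int) < x then x else 0) = x := by
        have := h x (by simp); by_cases hx : (0:Int) < x <;> simp [hx]; omega
      rw [List.foldl_cons, hmax, h0, PySem.List.maxD_id_cons]

theorem pv_le_maxfold (t : List Int) (a : Int) :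
    a ≤ t.foldl (fun m x => if m < x then x else m) a := by
  induction t generalizing a with
  | nil => exact le_refl a
  | cons x t ih =>
      simp only [List.foldl_cons]
      refine le_trans ?_ (ih (if a < x then x else a))
      by_cases hx : a < x <;> simp [hx]; omega

-- ===== VERDICT (by name: the statement is the Claim_ definition above) =====
theorem gen_token_flag_list_spec : Claim_equal_gen_token_flag_list := by
  intro vi _ _
  unfold Spec_gen_token_flag_list
  simp only [gen_token_flag_list, gen_token_flag_list_alt]
  have hnn : ∀ x ∈ vi.map (fun v => ((pvFiles v).length : Int)), 0 ≤ x := by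
    intro x hx
    simp only [List.mem_map] at hx
    obtain ⟨v, -, rfl⟩ := hx
    positivity
  have hfold : vi.foldl (fun m v =>
        if m < ((pvFiles v).length : Int) then ((pvFiles v).length : Int) else m) 0
      = PySem.List.maxD (vi.map (fun v => ((pvFiles v).length : Int))) (fun x => x) 0 :=
    calc vi.foldl (fun m v =>
          if m < ((pvFiles v).length : Int) then ((pvFiles v).length : Int) else m) 0
        = (vi.map (fun v => ((pvFiles v).length : Int))).foldl
            (fun m x => if m < x then x else m) 0 := by rw [List.foldl_map]
      _ = _ := pv_maxfold_eq _ hnn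
  rw [hfold]
  set M := PySem.List.maxD (vi.map (fun v => ((pvFiles v).length : Int))) (fun x => x) 0 with hM
  have hM0 : 0 ≤ M := by
    rw [hM, ← pv_maxfold_eq _ hnn]
    exact pv_le_maxfold _ 0
  obtain ⟨N, hN⟩ : ∃ N : Nat, M = (N : Int) := ⟨M.toNat, (Int.toNat_of_nonneg hM0).symm⟩
  rw [hN]
  rw [PySem.List.foldl_append_singleton_eq_map (fun _ => false)]
  rw [PySem.List.pyRange_zero_nat, List.map_map, List.nil_append]
  rw [pv_outer_spec]
  rw [List.map_map]
  apply List.map_congr_left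
  intro k hk
  simp [pvCol, PySem.List.pyGetD_natCast]
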